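-- pv_equiv track=rewrite | github.com/paiml/depyler | examples/hard_comprehensions.py | abs_set
-- ===== SOURCE A (Python) =====
-- def abs_set(data: list[int]) -> list[int]:
--     """Compute set of absolute values from data using set-like dedup."""
--     seen: list[int] = []
--     for x in data:
--         val: int = x if x >= 0 else -x
--         found: bool = False
--         for s in seen:
--             if s == val:
--                 found = True
--         if not found:
--             seen.append(val)
--     seen.sort()
--     return seen
-- ===== SOURCE B (Python) =====
-- def abs_set(data: list[int]) -> list[int]:
--     """Sorted unique absolute values: sort first, then drop adjacent duplicates."""
--     vals = sorted(abs(x) for x in data)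
--     out: list[int] = []
--     for v in vals:
--         if not out or out[-1] != v:
--             out.append(v)
--     return out
-- ===== Notes on version B (the rewrite author's own statement) =====
-- stated objective: faster
-- what changed: Replaced the quadratic dedup-by-scanning-seen-list (then sort) with sort-first and a single linear adjacent-duplicate-removal pass.
import Mathlib
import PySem

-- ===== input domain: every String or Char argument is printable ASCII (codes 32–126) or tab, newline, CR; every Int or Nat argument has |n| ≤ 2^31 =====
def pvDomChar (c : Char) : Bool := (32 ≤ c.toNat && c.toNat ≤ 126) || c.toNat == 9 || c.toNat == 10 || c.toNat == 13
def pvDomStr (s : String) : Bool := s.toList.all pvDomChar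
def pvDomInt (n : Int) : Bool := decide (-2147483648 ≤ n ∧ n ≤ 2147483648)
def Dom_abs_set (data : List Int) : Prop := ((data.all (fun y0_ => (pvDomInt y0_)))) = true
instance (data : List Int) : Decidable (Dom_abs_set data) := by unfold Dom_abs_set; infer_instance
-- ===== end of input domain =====

-- B changes the algorithm: A dedups by scanning the seen-list per element and sorts last (O(n^2));
-- B sorts the absolute values first and removes adjacent duplicates in one linear pass.

-- ===== PORT A =====
-- loop body of A's for-loop: inner scan over `seen` sets `found`; append if not found
def absSetStepA (seen : List Int) (x : Int) : List Int :=
  let val : Int := if x ≥ 0 then x else -x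
  let found : Bool := seen.foldl (fun found s => if s = val then true else found) false
  if !found then seen ++ [val] else seen

def abs_set (data : List Int) : List Int :=
  let seen := data.foldl absSetStepA []
  PySem.List.sorted seen (fun x => x) false

-- ===== PORT B =====
-- loop body of B's pass: `if not out or out[-1] != v: out.append(v)`
def absSetStepB (out : List Int) (v : Int) : List Int :=
  match out.getLast? with
  | none => out ++ [v]
  | some w => if w ≠ v then out ++ [v] else out

def abs_set_alt (data : List Int) : List Int :=
  let vals := PySem.List.sorted (data.map (fun x => |x|)) (fun x => x) false
  vals.foldl absSetStepB []

-- ===== PRECONDITION & SPEC =====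
def Spec_abs_set (data : List Int) (out : List Int) : Prop := out = abs_set_alt data
instance (data : List Int) (out : List Int) : Decidable (Spec_abs_set data out) := by unfold Spec_abs_set; infer_instance

-- ===== CLAIM (what is proved, stated in full; the proofs are below) =====
def Claim_equal_abs_set : Prop := ∀ (data : List Int), Dom_abs_set data → Spec_abs_set data (abs_set data)

-- ===== LEMMAS AND PROOFS =====

-- A's inner scan computes membership of val in seen
theorem absSet_inner_fold (seen : List Int) (val : Int) (b : Bool) :
    seen.foldl (fun found s => decide (s = val) || found) b
      = (b || decide (val ∈ seen)) := by
  induction seen generalizing b with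
  | nil => simp
  | cons s t ih =>
      by_cases h : s = val
      · subst h
        simp [List.foldl, ih]
      · simp [List.foldl, ih, h, Ne.symm h]

-- A's outer fold: preserves Nodup and collects exactly the absolute values
theorem absSet_A_fold (data : List Int) : ∀ (acc : List Int), acc.Nodup →
    (data.foldl absSetStepA acc).Nodup ∧
      (∀ y, y ∈ data.foldl absSetStepA acc ↔ y ∈ acc ∨ ∃ x ∈ data, |x| = y) := by
  induction data with
  | nil => intro acc h; simpa using h
  | cons x t ih =>
      intro acc hnd
      have habs : (if x ≥ 0 then x else -x) = |x| := by
        by_cases h : x ≥ 0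
        · simp [h, abs_of_nonneg h]
        · simp [h, abs_of_neg (lt_of_not_ge h)]
      by_cases hmem : |x| ∈ acc
      · have hstep : absSetStepA acc x = acc := by
          simp [absSetStepA, absSet_inner_fold, habs, hmem]
        have := ih acc hnd
        refine ⟨by simpa [List.foldl, hstep] using this.1, ?_⟩
        intro y
        rw [List.foldl, hstep, (this.2 y)]
        constructor
        · rintro (h | ⟨z, hz, rfl⟩)
          · exact Or.inl h
          · exact Or.inr ⟨z, List.mem_cons_of_mem _ hz, rfl⟩
        · rintro (h | ⟨z, hz, rfl⟩)
          · exact Or.inl h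
          · rcases List.mem_cons.mp hz with rfl | hz
            · exact Or.inl hmem
            · exact Or.inr ⟨z, hz, rfl⟩
      · have hstep : absSetStepA acc x = acc ++ [|x|] := by
          simp [absSetStepA, absSet_inner_fold, habs, hmem]
        have hnd' : (acc ++ [|x|]).Nodup := by
          simp [List.nodup_append, hnd, hmem]
          intro a ha h
          exact hmem (h ▸ ha)
        have := ih (acc ++ [|x|]) hnd'
        refine ⟨by simpa [List.foldl, hstep] using this.1, ?_⟩
        intro y
        rw [List.foldl, hstep, (this.2 y)]
        constructor
        · rintro (h | ⟨z, hz, rfl⟩)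
          · rcases List.mem_append.mp h with h | h
            · exact Or.inl h
            · rcases List.mem_singleton.mp h with rfl
              exact Or.inr ⟨x, List.mem_cons_self .., rfl⟩
          · exact Or.inr ⟨z, List.mem_cons_of_mem _ hz, rfl⟩
        · rintro (h | ⟨z, hz, rfl⟩)
          · exact Or.inl (List.mem_append.mpr (Or.inl h))
          · rcases List.mem_cons.mp hz with rfl | hz
            · exact Or.inl (List.mem_append.mpr (Or.inr (List.mem_singleton.mpr rfl)))
            · exact Or.inr ⟨z, hz, rfl⟩

-- getLast? = some w implies membership
theorem mem_of_getLast?_eq (l : List Int) (w : Int) (h : l.getLast? = some w) : w ∈ l := by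
  obtain ⟨hne, rfl⟩ := List.mem_getLast?_eq_getLast (Option.mem_def.mpr h)
  exact List.getLast_mem hne

-- in a (weakly) sorted list, every element is ≤ the last one
theorem le_getLast_of_pairwise_le (l : List Int) :
    l.Pairwise (· ≤ ·) → ∀ a ∈ l, ∀ w, l.getLast? = some w → a ≤ w := by
  induction l with
  | nil => intro _ a ha; cases ha
  | cons x t ih =>
      intro hp a ha w hw
      rcases List.pairwise_cons.mp hp with ⟨hx, ht⟩
      cases t with
      | nil =>
          simp at hw
          rcases List.mem_singleton.mp ha with rfl
          omega
      | cons y s =>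
          have hw' : (y :: s).getLast? = some w := by
            simpa [List.getLast?_cons_cons] using hw
          have hwmem : w ∈ y :: s := mem_of_getLast?_eq _ _ hw' 
          rcases List.mem_cons.mp ha with rfl | ha'
          · exact hx w hwmem
          · exact ih ht a ha' w hw'

-- B's fold: on a weakly sorted input it yields a strictly sorted list with the same members
theorem absSet_B_fold (l : List Int) : ∀ (acc : List Int),
    acc.Pairwise (· < ·) → l.Pairwise (· ≤ ·) →
    (∀ a ∈ acc, ∀ v ∈ l, a ≤ v) →
    (l.foldl absSetStepB acc).Pairwise (· < ·) ∧
      (∀ y, y ∈ l.foldl absSetStepB acc ↔ y ∈ acc ∨ y ∈ l) := by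
  induction l with
  | nil => intro acc h1 _ _; exact ⟨h1, by simp⟩
  | cons v t ih =>
      intro acc hacc hl hle
      rcases List.pairwise_cons.mp hl with ⟨hv, ht⟩
      cases hlast : acc.getLast? with
      | none =>
          have hnil : acc = [] := List.getLast?_eq_none_iff.mp hlast
          subst hnil
          have hstep : absSetStepB [] v = [v] := by simp [absSetStepB]
          have := ih [v] (by simp) ht (by simpa using hv)
          refine ⟨by simpa [List.foldl, hstep] using this.1, ?_⟩
          intro y
          rw [List.foldl, hstep, this.2 y]
          simp [or_comm]
      | some w =>
          have hwmem : w ∈ acc := mem_of_getLast?_eq _ _ hlast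
          by_cases hwv : w = v
          · subst hwv
            have hstep : absSetStepB acc w = acc := by simp [absSetStepB, hlast]
            have hle' : ∀ a ∈ acc, ∀ u ∈ t, a ≤ u :=
              fun a ha u hu => hle a ha u (List.mem_cons_of_mem _ hu)
            have := ih acc hacc ht hle'
            refine ⟨by simpa [List.foldl, hstep] using this.1, ?_⟩
            intro y
            rw [List.foldl, hstep, this.2 y]
            constructor
            · rintro (h | h)
              · exact Or.inl h
              · exact Or.inr (List.mem_cons_of_mem _ h)
            · rintro (h | h)
              · exact Or.inl h
              · rcases List.mem_cons.mp h with rfl | h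
                · exact Or.inl hwmem
                · exact Or.inr h
          · have hstep : absSetStepB acc v = acc ++ [v] := by
              simp [absSetStepB, hlast, hwv]
            have hlt : ∀ a ∈ acc, a < v := by
              intro a ha
              have h1 : a ≤ v := hle a ha v (List.mem_cons_self ..)
              rcases lt_or_eq_of_le h1 with h | rfl
              · exact h
              · -- a = v ∈ acc, so v ≤ w (last), and w ≤ v, contradicting w ≠ v
                have h2 : a ≤ w :=
                  le_getLast_of_pairwise_le acc (hacc.imp le_of_lt) a ha w hlast
                have h3 : w ≤ a := hle w hwmem a (List.mem_cons_self ..)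
                exact absurd (le_antisymm h3 h2) hwv
            have hacc' : (acc ++ [v]).Pairwise (· < ·) := by
              rw [List.pairwise_append]
              exact ⟨hacc, by simp, by simpa using hlt⟩
            have hle' : ∀ a ∈ acc ++ [v], ∀ u ∈ t, a ≤ u := by
              intro a ha u hu
              rcases List.mem_append.mp ha with ha | ha
              · exact hle a ha u (List.mem_cons_of_mem _ hu)
              · rcases List.mem_singleton.mp ha with rfl
                exact hv u hu
            have := ih (acc ++ [v]) hacc' ht hle'
            refine ⟨by simpa [List.foldl, hstep] using this.1, ?_⟩
            intro y
            rw [List.foldl, hstep, this.2 y]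
            constructor
            · rintro (h | h)
              · rcases List.mem_append.mp h with h | h
                · exact Or.inl h
                · rcases List.mem_singleton.mp h with rfl
                  exact Or.inr (List.mem_cons_self ..)
              · exact Or.inr (List.mem_cons_of_mem _ h)
            · rintro (h | h)
              · exact Or.inl (List.mem_append.mpr (Or.inl h))
              · rcases List.mem_cons.mp h with rfl | h
                · exact Or.inl (List.mem_append.mpr (Or.inr (List.mem_singleton.mpr rfl)))
                · exact Or.inr h

-- two strictly increasing lists with the same members are equal
theorem strict_sorted_ext (l1 l2 : List Int)
    (h1 : l1.Pairwise (· < ·)) (h2 : l2.Pairwise (· < ·))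
    (hm : ∀ y, y ∈ l1 ↔ y ∈ l2) : l1 = l2 := by
  have nd1 : l1.Nodup := h1.imp ne_of_lt
  have nd2 : l2.Nodup := h2.imp ne_of_lt
  have hp : l1.Perm l2 := (List.perm_ext_iff_of_nodup nd1 nd2).mpr hm
  exact List.Perm.eq_of_pairwise (fun a b _ _ hab hba => absurd hba (not_lt.mpr hab.le)) h1 h2 hp

-- ===== VERDICT (by name: the statement is the Claim_ definition above) =====
theorem abs_set_spec : Claim_equal_abs_set := by
  intro data _
  unfold Spec_abs_set abs_set abs_set_alt
  -- A side
  obtain ⟨hndA, hmemA⟩ := absSet_A_fold data [] (by simp)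
  set seen := data.foldl absSetStepA [] with hseen
  have hsortA : (PySem.List.sorted seen (fun x => x) false).Pairwise (· < ·) := by
    have hle : (PySem.List.sorted seen (fun x => x) false).Pairwise (· ≤ ·) := by
      simpa using PySem.List.sorted_pairwise (xs := seen) (key := fun x => x)
    have hnd : (PySem.List.sorted seen (fun x => x) false).Nodup :=
      (PySem.List.sorted_perm (xs := seen) (key := fun x => x) (rev := false)).nodup_iff.mpr hndA
    exact (hle.and hnd).imp (fun h => lt_of_le_of_ne h.1 h.2)
  have hmemA' : ∀ y, y ∈ PySem.List.sorted seen (fun x => x) false ↔ ∃ x ∈ data, |x| = y := by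
    intro y
    rw [PySem.List.mem_sorted, hmemA y]
    simp
  -- B side
  set vals := PySem.List.sorted (data.map (fun x => |x|)) (fun x => x) false with hvals
  have hvle : vals.Pairwise (· ≤ ·) := by
    simpa using PySem.List.sorted_pairwise (xs := data.map (fun x => |x|)) (key := fun x => x)
  obtain ⟨hsortB, hmemB⟩ := absSet_B_fold vals [] (by simp) hvle (by simp)
  have hmemB' : ∀ y, y ∈ vals.foldl absSetStepB [] ↔ ∃ x ∈ data, |x| = y := by
    intro y
    rw [hmemB y, hvals, PySem.List.mem_sorted]
    simp
  exact strict_sorted_ext _ _ hsortA hsortB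
    (fun y => by rw [hmemA' y, hmemB' y])
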